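-- pv_equiv track=rewrite | github.com/s3team/uroboros | src/arm_postprocess.py | check_switch_pattern
-- ===== SOURCE A (Python) =====
-- def check_switch_pattern(lines):
--     """
--     Check if lines contain a switch table pattern.
--
--     Returns:
--         tuple: (bool, int) indicating if the pattern was found and the span length.
--     """
--     if len(lines) < 6:
--         return (False, 0)
--
--     # Filter out label lines (e.g., "BB_17:") and track their positions
--     instruction_indices = []
--     for i, line in enumerate(lines):
--         stripped = line.strip()
--         # Skip lines that are only labels (end with : and don't contain instruction keywords)
--         if stripped.endswith(':') and not any(pattern in line.lower() for pattern in ['cmp', 'bhi', 'add', 'ldr', 'bx', 'mov', 'sub']):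
--             continue
--         instruction_indices.append(i)
--
--     # Need at least 6 instruction lines for the pattern
--     if len(instruction_indices) < 6:
--         return (False, 0)
--
--     # Check the pattern against the first 6 instructions
--     instruction_lines = [lines[i] for i in instruction_indices[:6]]
--
--     if (
--         "cmp" in instruction_lines[0]
--         and "bhi" in instruction_lines[1]
--         and "add" in instruction_lines[2]
--         and "ldr" in instruction_lines[3]
--         and "add" in instruction_lines[4]
--         and "bx" in instruction_lines[5]
--     ):
--         # Calculate the span: from start to the end of the 6th instruction
--         pattern_length = instruction_indices[5] + 1
--         return (True, pattern_length)
--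
--     return (False, 0)
-- ===== SOURCE B (Python) =====
-- EXPECTED = ['cmp', 'bhi', 'add', 'ldr', 'add', 'bx']
-- KEYWORDS = ['cmp', 'bhi', 'add', 'ldr', 'bx', 'mov', 'sub']
--
--
-- def check_switch_pattern(lines):
--     """Single positional pass: skip label-only lines, match each instruction
--     line against the pattern cursor, succeed when all 6 match."""
--     count = 0
--     for i, line in enumerate(lines):
--         stripped = line.strip()
--         if stripped.endswith(':') and not any(k in line.lower() for k in KEYWORDS):
--             continue
--         if EXPECTED[count] not in line:
--             return (False, 0)
--         count += 1
--         if count == 6: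
--             return (True, i + 1)
--     return (False, 0)
-- ===== Notes on version B (the rewrite author's own statement) =====
-- stated objective: simpler
-- what changed: A filters all label lines into a full index list, slices the first 6 and re-checks them against six hard-coded memberships; B makes one interleaved pass with a pattern cursor over an expected-mnemonic table, failing at the first mismatching instruction and succeeding as soon as the sixth matches.
import Mathlib
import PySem

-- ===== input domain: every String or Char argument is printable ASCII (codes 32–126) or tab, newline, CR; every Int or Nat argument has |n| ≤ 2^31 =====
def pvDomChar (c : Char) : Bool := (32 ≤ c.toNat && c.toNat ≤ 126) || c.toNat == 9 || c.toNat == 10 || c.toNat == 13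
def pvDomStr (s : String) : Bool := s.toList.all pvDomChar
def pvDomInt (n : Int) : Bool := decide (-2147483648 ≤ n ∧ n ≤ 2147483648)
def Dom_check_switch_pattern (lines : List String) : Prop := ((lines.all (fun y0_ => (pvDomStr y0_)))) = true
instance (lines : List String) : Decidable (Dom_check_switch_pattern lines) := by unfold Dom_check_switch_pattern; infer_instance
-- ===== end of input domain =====

-- B replaces A's three phases (collect all instruction indices, slice, check) by one pass
-- with a pattern cursor; objective: simpler, same behaviour.

-- ===== PORT A =====
-- the label-skip predicate shared verbatim by both Pythons
def pvKeywords : List String := ["cmp", "bhi", "add", "ldr", "bx", "mov", "sub"]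

def pvIsLabel (line : String) : Bool :=
  PySem.Str.endswith (PySem.Str.strip line) ":" &&
    !(pvKeywords.any (fun pat => PySem.Str.isIn pat (PySem.Str.lower line)))

def check_switch_pattern (lines : List String) : Bool × Int :=
  if PySem.List.len lines < 6 then (false, 0)
  else
    let instruction_indices : List Int :=
      (PySem.List.enumerate lines).foldl
        (fun acc p => if pvIsLabel p.2 then acc else acc ++ [p.1]) []
    if PySem.List.len instruction_indices < 6 then (false, 0)
    else
      let instruction_lines : List String :=
        (PySem.List.slice instruction_indices none (some 6)).map
          (fun i => PySem.List.pyGetD lines i "")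
      if PySem.Str.isIn "cmp" (PySem.List.pyGetD instruction_lines 0 "")
          && PySem.Str.isIn "bhi" (PySem.List.pyGetD instruction_lines 1 "")
          && PySem.Str.isIn "add" (PySem.List.pyGetD instruction_lines 2 "")
          && PySem.Str.isIn "ldr" (PySem.List.pyGetD instruction_lines 3 "")
          && PySem.Str.isIn "add" (PySem.List.pyGetD instruction_lines 4 "")
          && PySem.Str.isIn "bx" (PySem.List.pyGetD instruction_lines 5 "")
      then (true, PySem.List.pyGetD instruction_indices 5 0 + 1)
      else (false, 0)

-- ===== PORT B =====
def pvExpected : List String := ["cmp", "bhi", "add", "ldr", "add", "bx"]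

def pvLoopB : List (Int × String) → Nat → Bool × Int
  | [], _ => (false, 0)
  | p :: rest, count =>
    if pvIsLabel p.2 then pvLoopB rest count
    else if !(PySem.Str.isIn (PySem.List.pyGetD pvExpected (count : Int) "") p.2) then (false, 0)
    else if count + 1 = 6 then (true, p.1 + 1)
    else pvLoopB rest (count + 1)

def check_switch_pattern_alt (lines : List String) : Bool × Int :=
  pvLoopB (PySem.List.enumerate lines) 0

-- ===== PRECONDITION & SPEC =====
def Spec_check_switch_pattern (lines : List String) (out : Bool × Int) : Prop := out = check_switch_pattern_alt lines
instance (lines : List String) (out : Bool × Int) : Decidable (Spec_check_switch_pattern lines out) := by unfold Spec_check_switch_pattern; infer_instance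

-- ===== CLAIM (what is proved, stated in full; the proofs are below) =====
def Claim_equal_check_switch_pattern : Prop := ∀ (lines : List String), Dom_check_switch_pattern lines → Spec_check_switch_pattern lines (check_switch_pattern lines)

-- ===== LEMMAS AND PROOFS =====

-- common characterisation: match the filtered (non-label) enumerated lines
-- positionally against a list of expected mnemonics
def pvSpecRem : List (Int × String) → List String → Bool × Int
  | _, [] => (false, 0)
  | [], _ :: _ => (false, 0)
  | p :: is, e :: es =>
    if PySem.Str.isIn e p.2 then
      (if es = [] then (true, p.1 + 1) else pvSpecRem is es)
    else (false, 0)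

theorem pvSpecRem_short (is : List (Int × String)) (es : List String)
    (h : is.length < es.length) : pvSpecRem is es = (false, 0) := by
  match is, es with
  | _, [] => simp at h
  | [], _ :: _ => rfl
  | p :: is, e :: es =>
    simp only [pvSpecRem]
    have hlt : is.length < es.length := by simpa using h
    have hne : es ≠ [] := by intro hnil; rw [hnil] at hlt; simp at hlt
    rw [pvSpecRem_short is es hlt]
    simp [hne]

theorem pvLoopB_eq_specRem (l : List (Int × String)) :
    ∀ (count : Nat) (es : List String), count + es.length = 6 → es ≠ [] →
      pvExpected.drop count = es →
      pvLoopB l count = pvSpecRem (l.filter (fun p => !pvIsLabel p.2)) es := by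
  induction l with
  | nil =>
    intro count es _ hne _
    rcases es with _ | ⟨e, es'⟩
    · exact absurd rfl hne
    · rfl
  | cons p l ih =>
    intro count es hlen hne hdrop
    rcases es with _ | ⟨e, es'⟩
    · exact absurd rfl hne
    by_cases hl : pvIsLabel p.2
    · have hf : (p :: l).filter (fun q => !pvIsLabel q.2)
          = l.filter (fun q => !pvIsLabel q.2) := List.filter_cons_of_neg (by simp [hl])
      rw [hf]
      simp only [pvLoopB, hl, if_true]
      exact ih count (e :: es') hlen hne hdrop
    · have hget : PySem.List.pyGetD pvExpected ((count : Nat) : Int) "" = e := by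
        have h? : pvExpected[count]? = some e := by
          have hd : (pvExpected.drop count)[0]? = some e := by rw [hdrop]; rfl
          simpa using hd
        rw [PySem.List.pyGetD_natCast, List.getD_eq_getElem?_getD, h?]
        rfl
      rw [List.filter_cons_of_pos (by simp [hl])]
      simp only [pvLoopB, hl, if_false, Bool.false_eq_true, hget]
      cases hmatch : PySem.Str.isIn e p.2 with
      | false =>
        have hm' : PySem.Chars.isIn e.toList p.2.toList = false := by simpa using hmatch
        simp [pvSpecRem, hm']
      | true =>
        simp only [hmatch, Bool.not_true, Bool.false_eq_true, if_false, pvSpecRem, if_true]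
        rcases es' with _ | ⟨e2, es''⟩
        · have h6 : count + 1 = 6 := by simpa using hlen
          simp [h6]
        · have hne6 : ¬ (count + 1 = 6) := by
            simp only [List.length_cons] at hlen; omega
          have hdrop' : pvExpected.drop (count + 1) = e2 :: es'' := by
            have h2 := congrArg (List.drop 1) hdrop
            simp only [List.drop_drop] at h2
            simpa [Nat.add_comm] using h2
          simp only [hne6, if_false]
          rw [ih (count + 1) (e2 :: es'')
            (by simp only [List.length_cons] at hlen ⊢; omega) (by simp) hdrop']
          simp

theorem pvMem_filter_getD (lines : List String) (p : Int × String)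
    (hp : p ∈ (PySem.List.enumerate lines).filter (fun q => !pvIsLabel q.2)) :
    PySem.List.pyGetD lines p.1 "" = p.2 := by
  have hmem : p ∈ PySem.List.enumerate lines := List.mem_of_mem_filter hp
  rw [PySem.List.mem_enumerate_iff] at hmem
  obtain ⟨k, hk, rfl⟩ := hmem
  simp [PySem.List.pyGetD_natCast, List.getD_eq_getElem?_getD, hk]

theorem pvFilter_length_le (lines : List String) :
    ((PySem.List.enumerate lines).filter (fun q => !pvIsLabel q.2)).length ≤ lines.length := by
  calc ((PySem.List.enumerate lines).filter (fun q => !pvIsLabel q.2)).length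
      ≤ (PySem.List.enumerate lines).length := List.length_filter_le _ _
    _ = lines.length := by simp [PySem.List.length_enumerate]

set_option maxHeartbeats 1000000 in
theorem pvA_eq_specRem (lines : List String) :
    check_switch_pattern lines
      = pvSpecRem ((PySem.List.enumerate lines).filter (fun q => !pvIsLabel q.2)) pvExpected := by
  set fl := (PySem.List.enumerate lines).filter (fun q => !pvIsLabel q.2) with hfl
  have hfold : (PySem.List.enumerate lines).foldl
      (fun acc p => if pvIsLabel p.2 then acc else acc ++ [p.1]) [] = fl.map (fun x => x.1) := by
    have hfun : (fun (acc : List Int) (p : Int × String) =>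
        if pvIsLabel p.2 then acc else acc ++ [p.1])
        = (fun (acc : List Int) (p : Int × String) =>
            if (!pvIsLabel p.2) = true then acc ++ [p.1] else acc) := by
      funext acc p; cases h : pvIsLabel p.2 <;> simp [h]
    rw [hfun]
    rw [PySem.List.foldl_append_if (fun (p : Int × String) => !pvIsLabel p.2)
        (fun (p : Int × String) => p.1) (PySem.List.enumerate lines) []]
    simp [hfl]
  clear_value fl
  have hlenle := pvFilter_length_le lines
  by_cases h6 : fl.length < 6
  · -- too few instruction lines: A returns (false, 0) at one of its guards
    rw [pvSpecRem_short fl pvExpected (by simpa [pvExpected] using h6)]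
    simp only [check_switch_pattern]
    rw [hfold]
    by_cases hg : PySem.List.len lines < 6
    · rw [if_pos hg]
    · rw [if_neg hg]
      rw [if_pos (show PySem.List.len (fl.map (fun x => x.1)) < 6 by
        simp only [PySem.List.len_eq, List.length_map]; exact_mod_cast h6)]
  · -- at least six instruction lines
    rw [Nat.not_lt] at h6
    obtain ⟨p0, p1, p2, p3, p4, p5, rest, hsplit⟩ :
        ∃ p0 p1 p2 p3 p4 p5 rest, fl = p0 :: p1 :: p2 :: p3 :: p4 :: p5 :: rest := by
      match hm : fl, h6 with
      | a::b::c::d::e::f::r, _ => exact ⟨a, b, c, d, e, f, r, rfl⟩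
    have hg : ¬ PySem.List.len lines < 6 := by
      have h7 : 6 ≤ fl.length := h6
      rw [hfl] at h7
      simp only [PySem.List.len_eq]
      omega
    have hmem : ∀ q ∈ fl, PySem.List.pyGetD lines q.1 "" = q.2 := by
      intro q hq; exact pvMem_filter_getD lines q (hfl ▸ hq)
    have h0 := hmem p0 (by rw [hsplit]; simp)
    have h1 := hmem p1 (by rw [hsplit]; simp)
    have h2 := hmem p2 (by rw [hsplit]; simp)
    have h3 := hmem p3 (by rw [hsplit]; simp)
    have h4 := hmem p4 (by rw [hsplit]; simp)
    have h5 := hmem p5 (by rw [hsplit]; simp)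
    simp only [check_switch_pattern]
    rw [hfold, hsplit, if_neg hg]
    rw [if_neg (show ¬ PySem.List.len
        ((p0 :: p1 :: p2 :: p3 :: p4 :: p5 :: rest).map (fun x => x.1)) < 6 by
      simp only [PySem.List.len_eq, List.length_map, List.length_cons]; omega)]
    rw [PySem.List.slice_to _ (by norm_num)]
    have hidx : (PySem.List.pyGet? (p0.1 :: p1.1 :: p2.1 :: p3.1 :: p4.1 :: p5.1 ::
        List.map (fun x => x.1) rest) (5 : Int)).getD 0 = p5.1 := by
      rw [show (5 : Int) = ((5 : Nat) : Int) by norm_num, PySem.List.pyGet?_natCast]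
      rfl
    clear hmem hfold hlenle
    simp only [PySem.List.pyGetD] at h0 h1 h2 h3 h4 h5 ⊢
    simp only [pvSpecRem, pvExpected]
    norm_num [h0, h1, h2, h3, h4, h5]
    rw [hidx]
    clear hfl hsplit h6 hidx h0 h1 h2 h3 h4 h5 hg
    split_ifs <;> first | rfl | tauto

-- ===== VERDICT (by name: the statement is the Claim_ definition above) =====
theorem check_switch_pattern_spec : Claim_equal_check_switch_pattern := by
  intro lines _
  unfold Spec_check_switch_pattern check_switch_pattern_alt
  rw [pvA_eq_specRem lines,
    pvLoopB_eq_specRem (PySem.List.enumerate lines) 0 pvExpected (by decide) (by decide) rfl]
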